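-- pv_equiv track=rewrite | github.com/AmrYami/co-pilot | apps/dw/sql_builder.py | _ensure_single_order_by
-- ===== SOURCE A (Python) =====
-- from typing import Dict, Any, Iterable, Optional, Sequence, Tuple, List
--
-- def _ensure_single_order_by(sql: str) -> str:
--     lines = [ln for ln in sql.splitlines() if ln.strip()]
--     order_indices = [i for i, ln in enumerate(lines) if ln.strip().upper().startswith("ORDER BY ")]
--     if len(order_indices) <= 1:
--         return "\n".join(lines)
--     last = order_indices[-1]
--     kept: List[str] = []
--     for idx, line in enumerate(lines):
--         if idx in order_indices and idx != last:
--             continue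
--         kept.append(line)
--     return "\n".join(kept)
-- ===== SOURCE B (Python) =====
-- def _ensure_single_order_by(sql: str) -> str:
--     lines = [ln for ln in sql.splitlines() if ln.strip()]
--     out = []
--     seen_order_by = False
--     for ln in reversed(lines):
--         if ln.strip().upper().startswith("ORDER BY "):
--             if seen_order_by:
--                 continue
--             seen_order_by = True
--         out.append(ln)
--     out.reverse()
--     return "\n".join(out)
-- ===== Notes on version B (the rewrite author's own statement) =====
-- stated objective: simpler
-- what changed: Replaced A's two-pass scheme (collect all ORDER-BY line indices, then re-scan filtering by index membership against the last index) with a single reverse pass over the cleaned lines that keeps only the first ORDER-BY line seen and skips the rest; no index list is materialized.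
import Mathlib
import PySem

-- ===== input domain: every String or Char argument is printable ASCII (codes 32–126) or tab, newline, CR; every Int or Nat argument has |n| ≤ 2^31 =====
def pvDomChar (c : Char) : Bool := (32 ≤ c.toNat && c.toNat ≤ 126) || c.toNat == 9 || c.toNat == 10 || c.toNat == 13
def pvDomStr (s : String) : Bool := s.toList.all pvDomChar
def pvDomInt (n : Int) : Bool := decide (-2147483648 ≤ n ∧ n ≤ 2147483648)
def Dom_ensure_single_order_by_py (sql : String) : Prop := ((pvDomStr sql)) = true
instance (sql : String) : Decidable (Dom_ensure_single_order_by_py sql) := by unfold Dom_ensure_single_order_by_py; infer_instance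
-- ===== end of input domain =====

-- B replaces A's two-pass index bookkeeping (collect ORDER-BY indices, then filter by membership)
-- with one reverse pass keeping only the first ORDER-BY line seen; objective: simpler.

-- ===== PORT A =====
-- literal port of A: lines-comprehension, index-comprehension, early return, membership loop
def ensure_single_order_by_py (sql : String) : String :=
  let lines := (PySem.Str.splitlines sql).filter (fun ln => !(PySem.Str.strip ln == ""))
  let order_indices :=
    ((PySem.List.enumerate lines 0).filter
      (fun p => PySem.Str.startswith (PySem.Str.upper (PySem.Str.strip p.2)) "ORDER BY ")).map (·.1)
  if order_indices.length ≤ 1 then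
    PySem.Str.join "\n" lines
  else
    -- order_indices[-1]; the list is nonempty in this branch, so pyGet? is some and .getD 0 is never the default
    let last := (PySem.List.pyGet? order_indices (-1)).getD 0
    let kept :=
      ((PySem.List.enumerate lines 0).filter
        (fun p => !(order_indices.contains p.1 && p.1 != last))).map (·.2)
    PySem.Str.join "\n" kept

-- ===== PORT B =====
-- B's loop over reversed(lines): append unless an ORDER BY line was already seen
def pvLoopB {α : Type} (P : α → Bool) : List α → Bool → List α → List α
  | [], _, out => out
  | x :: r, seen, out =>
    if P x then
      if seen then pvLoopB P r seen out
      else pvLoopB P r true (out ++ [x])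
    else pvLoopB P r seen (out ++ [x])

def ensure_single_order_by_py_alt (sql : String) : String :=
  let lines := (PySem.Str.splitlines sql).filter (fun ln => !(PySem.Str.strip ln == ""))
  let out := pvLoopB (fun ln => PySem.Str.startswith (PySem.Str.upper (PySem.Str.strip ln)) "ORDER BY ")
      lines.reverse false []
  PySem.Str.join "\n" out.reverse

-- ===== PRECONDITION & SPEC =====
def Spec_ensure_single_order_by_py (sql : String) (out : String) : Prop := out = ensure_single_order_by_py_alt sql
instance (sql : String) (out : String) : Decidable (Spec_ensure_single_order_by_py sql out) := by unfold Spec_ensure_single_order_by_py; infer_instance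

-- ===== CLAIM (what is proved, stated in full; the proofs are below) =====
def Claim_equal_ensure_single_order_by_py : Prop := ∀ (sql : String), Dom_ensure_single_order_by_py sql → Spec_ensure_single_order_by_py sql (ensure_single_order_by_py sql)

-- ===== LEMMAS AND PROOFS =====

theorem pvLoopB_out {α : Type} (P : α → Bool) (rs : List α) (seen : Bool) (out : List α) :
    pvLoopB P rs seen out = out ++ pvLoopB P rs seen [] := by
  induction rs generalizing seen out with
  | nil => simp [pvLoopB]
  | cons x r ih =>
    simp only [pvLoopB]
    split_ifs with hx hs
    · exact ih _ _
    · rw [ih true (out ++ [x]), ih true ([] ++ [x])]; simp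
    · rw [ih seen (out ++ [x]), ih seen ([] ++ [x])]; simp

theorem pvLoopB_true {α : Type} (P : α → Bool) (rs : List α) :
    pvLoopB P rs true [] = rs.filter (fun x => !P x) := by
  induction rs with
  | nil => rfl
  | cons x r ih =>
    simp only [pvLoopB]
    split_ifs with hx
    · simp [ih, hx]
    · rw [pvLoopB_out]; simp [ih, hx]

theorem pvLoopB_false_noP {α : Type} (P : α → Bool) (rs : List α)
    (h : ∀ y ∈ rs, P y = false) : pvLoopB P rs false [] = rs := by
  induction rs with
  | nil => rfl
  | cons x r ih =>
    have hx := h x (by simp)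
    simp only [pvLoopB, hx, Bool.false_eq_true, if_false]
    rw [pvLoopB_out]
    simp [ih (fun y hy => h y (by simp [hy]))]

theorem pvLoopB_firstP {α : Type} (P : α → Bool) (a : List α) (x : α) (b : List α)
    (ha : ∀ y ∈ a, P y = false) (hx : P x = true) :
    pvLoopB P (a ++ x :: b) false [] = a ++ x :: b.filter (fun y => !P y) := by
  induction a with
  | nil =>
    simp only [List.nil_append, pvLoopB, hx, if_true, Bool.false_eq_true, if_false]
    rw [pvLoopB_out, pvLoopB_true]
    simp
  | cons y a ih =>
    have hy := ha y (by simp)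
    simp only [List.cons_append, pvLoopB, hy, Bool.false_eq_true, if_false]
    rw [pvLoopB_out]
    simp [ih (fun z hz => ha z (by simp [hz]))]

theorem pv_decomp {α : Type} (P : α → Bool) (ls : List α) (h : ls.any P = true) :
    ∃ a x b, ls = a ++ x :: b ∧ P x = true ∧ ∀ y ∈ b, P y = false := by
  induction ls with
  | nil => simp at h
  | cons z r ih =>
    by_cases hr : r.any P = true
    · obtain ⟨a, x, b, hab, hx, hb⟩ := ih hr
      exact ⟨z :: a, x, b, by rw [hab]; rfl, hx, hb⟩
    · have hz : P z = true := by
        simp only [List.any_cons, Bool.or_eq_true] at h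
        rcases h with h | h
        · exact h
        · exact absurd h hr
      refine ⟨[], z, r, rfl, hz, ?_⟩
      intro y hy
      by_contra hc
      exact hr (List.any_eq_true.2 ⟨y, hy, by simpa using hc⟩)

theorem pv_mapsnd_filter_enum {α : Type} (q : α → Bool) (ls : List α) (s : Int) :
    (((PySem.List.enumerate ls s).filter (fun p => q p.2)).map (·.2)) = ls.filter q := by
  induction ls generalizing s with
  | nil => simp [PySem.List.enumerate_nil]
  | cons x r ih =>
    rw [PySem.List.enumerate_cons]
    by_cases hx : q x = true
    · simp [hx, ih]
    · simp [hx, ih]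

theorem pv_enum_filter_nil_iff {α : Type} (q : α → Bool) (ls : List α) (s : Int) :
    ((PySem.List.enumerate ls s).filter (fun p => q p.2) = []) ↔ ∀ y ∈ ls, q y = false := by
  rw [List.filter_eq_nil_iff]
  constructor
  · intro h y hy
    obtain ⟨k, hk, rfl⟩ := List.mem_iff_getElem.1 hy
    have := h (s + k, ls[k]) ((PySem.List.mem_enumerate_iff _ _ _).2 ⟨k, hk, rfl⟩)
    simpa using this
  · intro h p hp
    obtain ⟨k, hk, rfl⟩ := (PySem.List.mem_enumerate_iff _ _ _).1 hp
    simp [h _ (List.getElem_mem hk)]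

theorem pv_fst_mem_filter_enum {α : Type} (q : α → Bool) (ls : List α) (s : Int)
    (k : Nat) (hk : k < ls.length) :
    ((s + k) ∈ (((PySem.List.enumerate ls s).filter (fun p => q p.2)).map (·.1)))
      ↔ q ls[k] = true := by
  constructor
  · intro h
    obtain ⟨p, hp, hfst⟩ := List.mem_map.1 h
    rw [List.mem_filter] at hp
    obtain ⟨hpe, hq⟩ := hp
    obtain ⟨j, hj, rfl⟩ := (PySem.List.mem_enumerate_iff _ _ _).1 hpe
    have : j = k := by simp only [] at hfst; omega
    subst this
    simpa using hq
  · intro h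
    exact List.mem_map.2 ⟨(s + k, ls[k]), List.mem_filter.2
      ⟨(PySem.List.mem_enumerate_iff _ _ _).2 ⟨k, hk, rfl⟩, by simpa using h⟩, rfl⟩

theorem pv_fst_bound_filter_enum {α : Type} (q : α → Bool) (ls : List α) (s : Int)
    (m : Int) (hm : m ∈ (((PySem.List.enumerate ls s).filter (fun p => q p.2)).map (·.1))) :
    s ≤ m ∧ m < s + ls.length := by
  obtain ⟨p, hp, rfl⟩ := List.mem_map.1 hm
  have hpe := (List.mem_filter.1 hp).1
  obtain ⟨j, hj, rfl⟩ := (PySem.List.mem_enumerate_iff _ _ _).1 hpe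
  constructor
  · simp
  · simp; omega

theorem pv_pyGet_last {α : Type} (ys : List α) (z : α) :
    PySem.List.pyGet? (ys ++ [z]) (-1) = some z := by
  simp [PySem.List.pyGet?, PySem.List.pyIdx?]

theorem pv_main (P : String → Bool) (ls : List String) :
    (if (((PySem.List.enumerate ls 0).filter (fun p => P p.2)).map (·.1)).length ≤ 1 then ls
     else
       ((PySem.List.enumerate ls 0).filter
         (fun p => !((((PySem.List.enumerate ls 0).filter (fun p => P p.2)).map (·.1)).contains p.1 &&
           p.1 != (PySem.List.pyGet? (((PySem.List.enumerate ls 0).filter (fun p => P p.2)).map (·.1)) (-1)).getD 0))).map (·.2))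
    = (pvLoopB P ls.reverse false []).reverse := by
  by_cases hany : ls.any P = true
  · obtain ⟨a, x, b, rfl, hx, hb⟩ := pv_decomp P ls hany
    have hrev : (a ++ x :: b).reverse = b.reverse ++ x :: a.reverse := by simp
    have hbrev : ∀ y ∈ b.reverse, P y = false := fun y hy => hb y (List.mem_reverse.1 hy)
    have hRHS : (pvLoopB P (a ++ x :: b).reverse false []).reverse
        = a.filter (fun y => !P y) ++ x :: b := by
      rw [hrev, pvLoopB_firstP P _ _ _ hbrev hx]
      simp
    have henum : PySem.List.enumerate (a ++ x :: b) (0:Int)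
        = PySem.List.enumerate a 0 ++ ((a.length : Int), x) :: PySem.List.enumerate b ((a.length : Int) + 1) := by
      rw [PySem.List.enumerate_append, PySem.List.enumerate_cons]
      norm_num
    have hFb : (PySem.List.enumerate b ((a.length : Int) + 1)).filter (fun p => P p.2) = [] :=
      (pv_enum_filter_nil_iff _ _ _).2 hb
    have hF : (PySem.List.enumerate (a ++ x :: b) (0:Int)).filter (fun p => P p.2)
        = ((PySem.List.enumerate a 0).filter (fun p => P p.2)) ++ [((a.length : Int), x)] := by
      rw [henum, List.filter_append, List.filter_cons, hFb]
      simp [hx]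
    have hO : (((PySem.List.enumerate (a ++ x :: b) (0:Int)).filter (fun p => P p.2)).map (·.1))
        = (((PySem.List.enumerate a (0:Int)).filter (fun p => P p.2)).map (·.1)) ++ [(a.length : Int)] := by
      rw [hF]; simp
    have hlast : (PySem.List.pyGet? (((PySem.List.enumerate (a ++ x :: b) (0:Int)).filter (fun p => P p.2)).map (·.1)) (-1)).getD 0
        = (a.length : Int) := by
      rw [hO, pv_pyGet_last]; rfl
    by_cases hFa : ((PySem.List.enumerate a (0:Int)).filter (fun p => P p.2)) = []
    · -- at most one ORDER BY line: A returns the lines unchanged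
      have ha : ∀ y ∈ a, P y = false := (pv_enum_filter_nil_iff _ _ _).1 hFa
      have hlen : (((PySem.List.enumerate (a ++ x :: b) (0:Int)).filter (fun p => P p.2)).map (·.1)).length ≤ 1 := by
        rw [hO, hFa]; simp
      rw [if_pos hlen, hRHS, List.filter_eq_self.2 (fun y hy => by simp [ha y hy])]
    · have hlen : ¬ (((PySem.List.enumerate (a ++ x :: b) (0:Int)).filter (fun p => P p.2)).map (·.1)).length ≤ 1 := by
        rw [hO]
        simp only [List.length_append, List.length_map, List.length_cons, List.length_nil]
        have : ((PySem.List.enumerate a (0:Int)).filter (fun p => P p.2)).length ≠ 0 := by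
          simpa [List.length_eq_zero_iff] using hFa
        omega
      rw [if_neg hlen]
      rw [hRHS]
      -- compute the kept list
      conv_lhs => rw [hlast, hO, henum]
      rw [List.filter_append, List.filter_cons]
      have hmid : (!((((PySem.List.enumerate a (0:Int)).filter (fun p => P p.2)).map (·.1) ++ [(a.length : Int)]).contains ((a.length : Int), x).1 &&
          ((a.length : Int), x).1 != (a.length : Int))) = true := by
        simp
      rw [if_pos hmid]
      have hseta : List.filter (fun p => !((((PySem.List.enumerate a (0:Int)).filter (fun p => P p.2)).map (·.1) ++ [(a.length : Int)]).contains p.1 &&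
            p.1 != (a.length : Int))) (PySem.List.enumerate a (0:Int))
          = List.filter (fun p => !P p.2) (PySem.List.enumerate a (0:Int)) := by
        apply List.filter_congr
        intro p hp
        obtain ⟨k, hk, rfl⟩ := (PySem.List.mem_enumerate_iff _ _ _).1 hp
        rw [show ((0:Int) + (k:Nat)) = ((k:Nat):Int) from by omega]
        have hne : ((k:Nat):Int) ≠ (a.length : Int) := by omega
        have hmemiff := pv_fst_mem_filter_enum P a 0 k hk
        rw [show ((0:Int) + (k:Nat)) = ((k:Nat):Int) from by omega] at hmemiff
        by_cases hq : P a[k] = true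
        · have hm : ((k:Nat):Int) ∈ ((((PySem.List.enumerate a (0:Int)).filter (fun p => P p.2)).map (·.1)) ++ [(a.length : Int)]) :=
            List.mem_append_left _ (hmemiff.2 hq)
          have hc : ((((PySem.List.enumerate a (0:Int)).filter (fun p => P p.2)).map (·.1) ++ [(a.length : Int)]).contains ((k:Nat):Int)) = true := by
            simpa using hm
          have hbne : (((k:Nat):Int) != (a.length : Int)) = true := by simpa using hne
          rw [hc, hbne]
          simp [hq]
        · have hmem : ((k:Nat):Int) ∉ (((PySem.List.enumerate a (0:Int)).filter (fun p => P p.2)).map (·.1) ++ [(a.length : Int)]) := by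
            intro hm
            rcases List.mem_append.1 hm with hm | hm
            · exact hq (hmemiff.1 hm)
            · exact hne (by simpa using hm)
          have hc : ((((PySem.List.enumerate a (0:Int)).filter (fun p => P p.2)).map (·.1) ++ [(a.length : Int)]).contains ((k:Nat):Int)) = false := by
            simpa using hmem
          rw [hc]
          simp [Bool.eq_false_iff.2 hq]
      have hsetb : List.filter (fun p => !((((PySem.List.enumerate a (0:Int)).filter (fun p => P p.2)).map (·.1) ++ [(a.length : Int)]).contains p.1 &&
            p.1 != (a.length : Int))) (PySem.List.enumerate b ((a.length : Int) + 1))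
          = PySem.List.enumerate b ((a.length : Int) + 1) := by
        apply List.filter_eq_self.2
        intro p hp
        obtain ⟨k, hk, rfl⟩ := (PySem.List.mem_enumerate_iff _ _ _).1 hp
        have hmem : ((a.length : Int) + 1 + (k:Nat)) ∉ (((PySem.List.enumerate a (0:Int)).filter (fun p => P p.2)).map (·.1) ++ [(a.length : Int)]) := by
          intro hm
          rcases List.mem_append.1 hm with hm | hm
          · have := pv_fst_bound_filter_enum P a 0 _ hm
            omega
          · have : ((a.length : Int) + 1 + (k:Nat)) = (a.length : Int) := by simpa using hm
            omega
        have hc : ((((PySem.List.enumerate a (0:Int)).filter (fun p => P p.2)).map (·.1) ++ [(a.length : Int)]).contains ((a.length : Int) + 1 + (k:Nat))) = false := by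
          simpa using hmem
        rw [hc]
        simp
      rw [hseta, hsetb]
      simp only [List.map_append, List.map_cons, PySem.List.map_snd_enumerate]
      exact congrArg (fun t => t ++ x :: b) (pv_mapsnd_filter_enum (fun y => !P y) a 0)
  · -- no ORDER BY line at all
    have h : ∀ y ∈ ls, P y = false := by
      intro y hy
      by_contra hc
      exact hany (List.any_eq_true.2 ⟨y, hy, by simpa using hc⟩)
    have hO : ((PySem.List.enumerate ls (0:Int)).filter (fun p => P p.2)) = [] :=
      (pv_enum_filter_nil_iff _ _ _).2 h
    rw [hO]
    simp only [List.map_nil, List.length_nil, Nat.zero_le, if_pos]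
    rw [pvLoopB_false_noP P _ (fun y hy => h y (List.mem_reverse.1 hy))]
    simp

-- ===== VERDICT (by name: the statement is the Claim_ definition above) =====
theorem ensure_single_order_by_py_spec : Claim_equal_ensure_single_order_by_py := by
  intro sql _
  unfold Spec_ensure_single_order_by_py ensure_single_order_by_py ensure_single_order_by_py_alt
  dsimp only
  rw [← apply_ite (PySem.Str.join "\n")]
  exact congrArg _ (pv_main (fun ln => PySem.Str.startswith (PySem.Str.upper (PySem.Str.strip ln)) "ORDER BY ") _)
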